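-- pv_equiv track=rewrite | github.com/kergene/advent-code | 2022/code_day_15.py | part_1
-- ===== SOURCE A (Python) =====
-- from queue import SimpleQueue
--
-- def part_1(data):
--     row = 2000000
--     beacons = set()
--     endpoints = set()
--     for sensor, beacon in data:
--         beacons.add(beacon)
--         exclusion_distance = manhatten_distance(sensor, beacon)
--         distance_to_row = abs(row - sensor[1])
--         if distance_to_row <= exclusion_distance:
--             buffer = exclusion_distance - distance_to_row
--             range_vals = sensor[0] - buffer, sensor[0] + buffer
--             endpoints.add(range_vals)
--     total_length = 0
--     endpoints = sorted(endpoints)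
--     endpoints_queue = SimpleQueue()
--     for endpoint in endpoints:
--         endpoints_queue.put(endpoint)
--     base_endpoint = None
--     while not endpoints_queue.empty():
--         if base_endpoint is None:
--             base_endpoint = endpoints_queue.get()
--         if not endpoints_queue.empty():
--             choice = endpoints_queue.get()
--             if is_overlap(base_endpoint, choice):
--                 base_endpoint = get_overlap(base_endpoint, choice)
--             else:
--                 total_length += base_endpoint[1] - base_endpoint[0] + 1
--                 base_endpoint = choice
--     if base_endpoint is not None:
--         total_length += base_endpoint[1] - base_endpoint[0] + 1
--     for beacon in beacons:
--         if beacon[1] == row: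
--             total_length -= 1
--     return total_length
--
-- def manhatten_distance(point1, point2):
--     return abs(point1[0] - point2[0]) + abs(point1[1] - point2[1])
--
-- def is_overlap(point1, point2):
--     return point1[0] <= point2[1] and point1[1] >= point2[0]
--
-- def get_overlap(point1, point2):
--     return min(point1[0], point2[0]), max(point1[1], point2[1])
-- ===== SOURCE B (Python) =====
-- def part_1(data):
--     row = 2000000
--     beacons = set()
--     intervals = []
--     for sensor, beacon in data:
--         beacons.add(beacon)
--         exclusion_distance = abs(sensor[0] - beacon[0]) + abs(sensor[1] - beacon[1])
--         distance_to_row = abs(row - sensor[1])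
--         if distance_to_row <= exclusion_distance:
--             buffer = exclusion_distance - distance_to_row
--             intervals.append((sensor[0] - buffer, sensor[0] + buffer))
--     events = sorted(e for a, b in intervals for e in ((a, 1), (b + 1, -1)))
--     total = 0
--     depth = 0
--     prev = 0
--     for x, delta in events:
--         if depth > 0:
--             total += x - prev
--         depth += delta
--         prev = x
--     for beacon in beacons:
--         if beacon[1] == row:
--             total -= 1
--     return total
-- ===== Notes on version B (the rewrite author's own statement) =====
-- stated objective: alternative
-- what changed: Replaces A's queue-based pairwise interval merging (SimpleQueue of sorted deduplicated ranges, merged/flushed one base interval at a time) with a sweep line: each inclusive range (a,b) emits events (a,+1) and (b+1,-1); after sorting, a running coverage depth and previous coordinate accumulate the union length directly.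
import Mathlib
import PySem

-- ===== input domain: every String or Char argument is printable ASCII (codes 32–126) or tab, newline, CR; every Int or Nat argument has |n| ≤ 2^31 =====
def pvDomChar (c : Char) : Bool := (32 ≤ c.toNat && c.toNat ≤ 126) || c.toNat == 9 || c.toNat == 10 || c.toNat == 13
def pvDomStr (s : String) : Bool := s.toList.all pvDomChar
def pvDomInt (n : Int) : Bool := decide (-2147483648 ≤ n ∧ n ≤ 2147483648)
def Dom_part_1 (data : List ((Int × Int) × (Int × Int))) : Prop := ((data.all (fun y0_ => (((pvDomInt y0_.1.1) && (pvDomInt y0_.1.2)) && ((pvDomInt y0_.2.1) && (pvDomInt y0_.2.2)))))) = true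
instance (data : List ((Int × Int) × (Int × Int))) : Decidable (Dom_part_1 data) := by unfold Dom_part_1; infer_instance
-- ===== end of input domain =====

-- B replaces A's queue-based interval merging with an event sweep (sorted (coordinate, ±1)
-- events and a running coverage depth); same result by a different merge mechanism.

-- ===== PORT A =====
def manhatten_distance (point1 point2 : Int × Int) : Int :=
  |point1.1 - point2.1| + |point1.2 - point2.2|

def is_overlap (point1 point2 : Int × Int) : Bool :=
  decide (point1.1 ≤ point2.2 ∧ point1.2 ≥ point2.1)

def get_overlap (point1 point2 : Int × Int) : Int × Int :=
  (min point1.1 point2.1, max point1.2 point2.2)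

-- A's while-loop over the endpoint queue; state = (remaining queue, base_endpoint, total_length)
def mergeGo : List (Int × Int) → Option (Int × Int) → Int → Int × Option (Int × Int)
  | [], base, total => (total, base)
  | e :: rest, none, total =>
    match rest with
    | [] => (total, some e)
    | choice :: rest' =>
      if is_overlap e choice then mergeGo rest' (some (get_overlap e choice)) total
      else mergeGo rest' (some choice) (total + (e.2 - e.1 + 1))
  | choice :: rest, some b, total =>
    if is_overlap b choice then mergeGo rest (some (get_overlap b choice)) total
    else mergeGo rest (some choice) (total + (b.2 - b.1 + 1))

def part_1 (data : List ((Int × Int) × (Int × Int))) : Int :=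
  let row : Int := 2000000
  let st := data.foldl
    (fun (st : PySem.Set (Int × Int) × PySem.Set (Int × Int)) sb =>
      (PySem.Set.add st.1 sb.2,
        if |row - sb.1.2| ≤ manhatten_distance sb.1 sb.2 then
          PySem.Set.add st.2
            (sb.1.1 - (manhatten_distance sb.1 sb.2 - |row - sb.1.2|),
             sb.1.1 + (manhatten_distance sb.1 sb.2 - |row - sb.1.2|))
        else st.2))
    (PySem.Set.empty, PySem.Set.empty)
  let endpoints := PySem.List.sorted2 st.2 Prod.fst Prod.snd false
  let r := mergeGo endpoints none 0
  let total_length : Int :=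
    match r.2 with
    | none => r.1
    | some b => r.1 + (b.2 - b.1 + 1)
  -- the final loop iterates the beacon set; the subtraction count is order-independent
  st.1.foldl (fun t beacon => if beacon.2 = row then t - 1 else t) total_length

-- ===== PORT B =====
def part_1_alt (data : List ((Int × Int) × (Int × Int))) : Int :=
  let row : Int := 2000000
  let st := data.foldl
    (fun (st : PySem.Set (Int × Int) × List (Int × Int)) sb =>
      (PySem.Set.add st.1 sb.2,
        if |row - sb.1.2| ≤ |sb.1.1 - sb.2.1| + |sb.1.2 - sb.2.2| then
          st.2 ++ [(sb.1.1 - ((|sb.1.1 - sb.2.1| + |sb.1.2 - sb.2.2|) - |row - sb.1.2|),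
                    sb.1.1 + ((|sb.1.1 - sb.2.1| + |sb.1.2 - sb.2.2|) - |row - sb.1.2|))]
        else st.2))
    (PySem.Set.empty, [])
  let events := PySem.List.sorted2
    (st.2.flatMap (fun ab => [(ab.1, (1 : Int)), (ab.2 + 1, (-1 : Int))]))
    Prod.fst Prod.snd false
  let r := events.foldl
    (fun (acc : Int × Int × Int) xd =>
      (if 0 < acc.2.1 then acc.1 + (xd.1 - acc.2.2) else acc.1, acc.2.1 + xd.2, xd.1))
    (0, 0, 0)
  st.1.foldl (fun t beacon => if beacon.2 = row then t - 1 else t) r.1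

-- ===== PRECONDITION & SPEC =====
def Spec_part_1 (data : List ((Int × Int) × (Int × Int))) (out : Int) : Prop := out = part_1_alt data
instance (data : List ((Int × Int) × (Int × Int))) (out : Int) : Decidable (Spec_part_1 data out) := by unfold Spec_part_1; infer_instance

-- ===== CLAIM (what is proved, stated in full; the proofs are below) =====
def Claim_equal_part_1 : Prop := ∀ (data : List ((Int × Int) × (Int × Int))), Dom_part_1 data → Spec_part_1 data (part_1 data)

-- ===== LEMMAS AND PROOFS =====

-- the set of row cells covered by a list of inclusive intervals
noncomputable def ivS : List (Int × Int) → Finset Int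
  | [] => ∅
  | p :: rest => Finset.Icc p.1 p.2 ∪ ivS rest

theorem mem_ivS (l : List (Int × Int)) (x : Int) :
    x ∈ ivS l ↔ ∃ p ∈ l, p.1 ≤ x ∧ x ≤ p.2 := by
  induction l with
  | nil => simp [ivS]
  | cons p rest ih => simp [ivS, ih, Finset.mem_Icc]

theorem ivS_congr (l₁ l₂ : List (Int × Int)) (h : ∀ p, p ∈ l₁ ↔ p ∈ l₂) :
    ivS l₁ = ivS l₂ := by
  ext x; simp only [mem_ivS]
  constructor
  · rintro ⟨p, hp, h1, h2⟩; exact ⟨p, (h p).mp hp, h1, h2⟩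
  · rintro ⟨p, hp, h1, h2⟩; exact ⟨p, (h p).mpr hp, h1, h2⟩

def finalizeM (r : Int × Option (Int × Int)) : Int :=
  r.1 + (match r.2 with | none => 0 | some b => b.2 - b.1 + 1)


theorem pairwise_fst_insertBy (before : (Int × Int) → (Int × Int) → Bool)
    (hT : ∀ a b, before a b = true → a.1 ≤ b.1)
    (hF : ∀ a b, before a b = false → b.1 ≤ a.1)
    (x : Int × Int) :
    ∀ acc : List (Int × Int), acc.Pairwise (fun p q => p.1 ≤ q.1) →
      (PySem.List.insertBy before x acc).Pairwise (fun p q => p.1 ≤ q.1) := by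
  intro acc
  induction acc with
  | nil => intro _; simp [PySem.List.insertBy]
  | cons y ys ih =>
    intro h
    rw [List.pairwise_cons] at h
    have heq : PySem.List.insertBy before x (y :: ys) =
        if before x y then x :: y :: ys else y :: PySem.List.insertBy before x ys := by
      simp [PySem.List.insertBy]
    rw [heq]
    by_cases hb : before x y = true
    · simp only [hb, if_true]
      refine List.pairwise_cons.mpr ⟨?_, List.pairwise_cons.mpr ⟨h.1, h.2⟩⟩
      intro z hz
      rcases List.mem_cons.mp hz with rfl | hz'
      · exact hT _ _ hb
      · exact le_trans (hT _ _ hb) (h.1 z hz')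
    · rw [Bool.not_eq_true] at hb
      simp only [hb]
      refine List.pairwise_cons.mpr ⟨?_, ih h.2⟩
      intro z hz
      rcases (PySem.List.mem_insertBy before x z ys).mp hz with rfl | hz'
      · exact hF _ _ hb
      · exact h.1 z hz'

theorem pairwise_fst_foldl (before : (Int × Int) → (Int × Int) → Bool)
    (hT : ∀ a b, before a b = true → a.1 ≤ b.1)
    (hF : ∀ a b, before a b = false → b.1 ≤ a.1) :
    ∀ (xs acc : List (Int × Int)), acc.Pairwise (fun p q => p.1 ≤ q.1) →
      (xs.foldl (fun acc x => PySem.List.insertBy before x acc) acc).Pairwise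
        (fun p q => p.1 ≤ q.1) := by
  intro xs
  induction xs with
  | nil => intro acc h; simpa using h
  | cons x xs ih =>
    intro acc h
    simpa using ih _ (pairwise_fst_insertBy before hT hF x acc h)

theorem pairwise_fst_sorted2 (xs : List (Int × Int)) :
    (PySem.List.sorted2 xs Prod.fst Prod.snd false).Pairwise (fun p q => p.1 ≤ q.1) := by
  unfold PySem.List.sorted2
  simp only [Bool.false_eq_true, if_false]
  exact pairwise_fst_foldl _
    (by intro a b hb; simp at hb; omega)
    (by intro a b hb; simp at hb; omega)
    xs [] (by simp)


-- ===== A-side: the queue merge computes the card of the union =====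
theorem mergeGo_none (e : Int × Int) (q : List (Int × Int)) (t : Int) :
    mergeGo (e :: q) none t = mergeGo q (some e) t := by
  cases q <;> simp [mergeGo]


theorem merge_main : ∀ (L : List (Int × Int)) (b : Int × Int) (t : Int),
    b.1 ≤ b.2 → (∀ p ∈ L, p.1 ≤ p.2) → (∀ p ∈ L, b.1 ≤ p.1) →
    L.Pairwise (fun p q => p.1 ≤ q.1) →
    finalizeM (mergeGo L (some b) t) = t + ((Finset.Icc b.1 b.2 ∪ ivS L).card : Int) := by
  intro L
  induction L with
  | nil =>
    intro b t hb _ _ _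
    simp only [mergeGo, finalizeM, ivS, Finset.union_empty, Int.card_Icc]
    rw [Int.toNat_of_nonneg (by omega)]
    ring
  | cons c L' ih =>
    intro b t hb hv hfst hpw
    have hc : c.1 ≤ c.2 := hv c (by simp)
    have hbc : b.1 ≤ c.1 := hfst c (by simp)
    rw [List.pairwise_cons] at hpw
    by_cases hov : is_overlap b c = true
    · have hov' : b.1 ≤ c.2 ∧ c.1 ≤ b.2 := by
        simpa [is_overlap, ge_iff_le, and_comm] using hov
      have hstep : mergeGo (c :: L') (some b) t
          = mergeGo L' (some (get_overlap b c)) t := by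
        simp [mergeGo, hov]
      rw [hstep]
      rw [ih (get_overlap b c) t
        (by simp [get_overlap]; omega)
        (fun p hp => hv p (by simp [hp]))
        (fun p hp => by have := hpw.1 p hp; simp [get_overlap]; omega)
        hpw.2]
      congr 2
      have : Finset.Icc (get_overlap b c).1 (get_overlap b c).2 ∪ ivS L'
          = Finset.Icc b.1 b.2 ∪ ivS (c :: L') := by
        show _ = Finset.Icc b.1 b.2 ∪ (Finset.Icc c.1 c.2 ∪ ivS L')
        have hmin : min b.1 c.1 = b.1 := min_eq_left hbc
        rcases le_total b.2 c.2 with h22 | h22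
        · have hmax : max b.2 c.2 = c.2 := max_eq_right h22
          ext x
          simp only [Finset.mem_union, Finset.mem_Icc, get_overlap, hmin, hmax]
          constructor
          · rintro (⟨h1, h2⟩ | h)
            · by_cases hxb : x ≤ b.2
              · exact Or.inl ⟨h1, hxb⟩
              · exact Or.inr (Or.inl ⟨by omega, h2⟩)
            · exact Or.inr (Or.inr h)
          · rintro (⟨h1, h2⟩ | ⟨h1, h2⟩ | h)
            · exact Or.inl ⟨h1, by omega⟩
            · exact Or.inl ⟨by omega, h2⟩
            · exact Or.inr h
        · have hmax : max b.2 c.2 = b.2 := max_eq_left h22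
          ext x
          simp only [Finset.mem_union, Finset.mem_Icc, get_overlap, hmin, hmax]
          constructor
          · rintro (⟨h1, h2⟩ | h)
            · exact Or.inl ⟨h1, h2⟩
            · exact Or.inr (Or.inr h)
          · rintro (⟨h1, h2⟩ | ⟨h1, h2⟩ | h)
            · exact Or.inl ⟨h1, h2⟩
            · exact Or.inl ⟨by omega, by omega⟩
            · exact Or.inr h
      rw [this]
    · have hov' : b.2 < c.1 := by
        simp [is_overlap, ge_iff_le] at hov
        omega
      have hstep : mergeGo (c :: L') (some b) t
          = mergeGo L' (some c) (t + (b.2 - b.1 + 1)) := by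
        simp [mergeGo, hov]
      rw [hstep]
      rw [ih c (t + (b.2 - b.1 + 1)) hc
        (fun p hp => hv p (by simp [hp]))
        (fun p hp => hpw.1 p hp)
        hpw.2]
      have hdisj : Disjoint (Finset.Icc b.1 b.2) (Finset.Icc c.1 c.2 ∪ ivS L') := by
        rw [Finset.disjoint_left]
        intro x hx hx'
        rw [Finset.mem_Icc] at hx
        rcases Finset.mem_union.mp hx' with h | h
        · rw [Finset.mem_Icc] at h; omega
        · rcases (mem_ivS L' x).mp h with ⟨p, hp, h1, h2⟩
          have := hpw.1 p hp
          omega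
      show _ = t + ((Finset.Icc b.1 b.2 ∪ (Finset.Icc c.1 c.2 ∪ ivS L')).card : Int)
      rw [Finset.card_union_of_disjoint hdisj]
      push_cast
      rw [Int.card_Icc]
      omega


theorem merge_total (L : List (Int × Int)) (hv : ∀ p ∈ L, p.1 ≤ p.2)
    (hs : L.Pairwise (fun p q => p.1 ≤ q.1)) :
    finalizeM (mergeGo L none 0) = ((ivS L).card : Int) := by
  cases L with
  | nil => simp [mergeGo, finalizeM, ivS]
  | cons e q =>
    rw [mergeGo_none]
    rw [List.pairwise_cons] at hs
    rw [merge_main q e 0 (hv e (by simp)) (fun p hp => hv p (by simp [hp])) hs.1 hs.2]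
    show (0 : Int) + ((ivS (e :: q)).card : Int) = _
    ring

-- ===== B-side: the sweep computes the card of the union =====
def dsum (E : List (Int × Int)) (y : Int) : Int :=
  ((E.filter (fun e => decide (e.1 ≤ y))).map Prod.snd).sum

noncomputable def covSet (E : List (Int × Int)) (d p M : Int) : Finset Int :=
  (Finset.Icc p (M - 1)).filter (fun y => 0 < d + dsum E y)

theorem dsum_cons (e : Int × Int) (E : List (Int × Int)) (y : Int) :
    dsum (e :: E) y = (if e.1 ≤ y then e.2 else 0) + dsum E y := by
  by_cases h : e.1 ≤ y <;> simp [dsum, h]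

theorem dsum_of_lt (E : List (Int × Int)) (x y : Int) (hE : ∀ f ∈ E, x ≤ f.1) (hy : y < x) :
    dsum E y = 0 := by
  have : E.filter (fun e => decide (e.1 ≤ y)) = [] := by
    rw [List.filter_eq_nil_iff]; intro f hf
    simpa using by have := hE f hf; omega
  simp [dsum, this]


theorem sweep_eq : ∀ (E : List (Int × Int)) (t d p M : Int),
    E.Pairwise (fun e f => e.1 ≤ f.1) →
    (∀ e ∈ E, p ≤ e.1) → (∀ e ∈ E, e.1 ≤ M) →
    d + (E.map Prod.snd).sum = 0 →
    (E.foldl (fun acc xd =>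
        (if 0 < acc.2.1 then acc.1 + (xd.1 - acc.2.2) else acc.1, acc.2.1 + xd.2, xd.1))
      (t, d, p)).1
      = t + ((covSet E d p M).card : Int) := by
  intro E
  induction E with
  | nil =>
    intro t d p M _ _ _ hsum
    have hd : d = 0 := by simpa using hsum
    simp [covSet, hd, dsum]
  | cons e E' ih =>
    intro t d p M hpw hlo hhi hsum
    rw [List.pairwise_cons] at hpw
    have hpe : p ≤ e.1 := hlo e (by simp)
    have heM : e.1 ≤ M := hhi e (by simp)
    have hstep : ((e :: E').foldl (fun acc xd =>
        (if 0 < acc.2.1 then acc.1 + (xd.1 - acc.2.2) else acc.1, acc.2.1 + xd.2, xd.1))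
        (t, d, p))
        = (E'.foldl (fun acc xd =>
        (if 0 < acc.2.1 then acc.1 + (xd.1 - acc.2.2) else acc.1, acc.2.1 + xd.2, xd.1))
        ((if 0 < d then t + (e.1 - p) else t), d + e.2, e.1)) := by
      simp [List.foldl_cons]
    rw [hstep, ih _ (d + e.2) e.1 M hpw.2
      (fun f hf => hpw.1 f hf) (fun f hf => hhi f (by simp [hf]))
      (by simp at hsum ⊢; omega)]
    -- split the covered set at e.1
    have hsplit : covSet (e :: E') d p M
        = (Finset.Icc p (e.1 - 1)).filter (fun _ => 0 < d) ∪ covSet E' (d + e.2) e.1 M := by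
      ext y
      simp only [covSet, Finset.mem_union, Finset.mem_filter, Finset.mem_Icc]
      by_cases hy : y < e.1
      · have h0 : dsum (e :: E') y = 0 := by
          refine dsum_of_lt _ e.1 y ?_ hy
          intro f hf
          rcases List.mem_cons.mp hf with rfl | hf'
          · exact le_refl _
          · exact hpw.1 f hf'
        have h0' : dsum E' y = 0 :=
          dsum_of_lt _ e.1 y (fun f hf => hpw.1 f hf) hy
        rw [h0]
        constructor
        · rintro ⟨⟨h1, h2⟩, h3⟩
          exact Or.inl ⟨⟨h1, by omega⟩, by omega⟩
        · rintro (⟨⟨h1, h2⟩, h3⟩ | ⟨⟨h1, h2⟩, h3⟩)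
          · exact ⟨⟨h1, by omega⟩, by omega⟩
          · omega
      · have hcons : dsum (e :: E') y = e.2 + dsum E' y := by
          rw [dsum_cons]; simp [show e.1 ≤ y by omega]
        rw [hcons]
        constructor
        · rintro ⟨⟨h1, h2⟩, h3⟩
          exact Or.inr ⟨⟨by omega, h2⟩, by omega⟩
        · rintro (⟨⟨h1, h2⟩, h3⟩ | ⟨⟨h1, h2⟩, h3⟩)
          · omega
          · exact ⟨⟨by omega, h2⟩, by omega⟩
    rw [hsplit]
    have hdisj : Disjoint ((Finset.Icc p (e.1 - 1)).filter (fun _ => 0 < d))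
        (covSet E' (d + e.2) e.1 M) := by
      rw [Finset.disjoint_left]
      intro y hy hy'
      simp only [Finset.mem_filter, Finset.mem_Icc] at hy
      simp only [covSet, Finset.mem_filter, Finset.mem_Icc] at hy'
      omega
    rw [Finset.card_union_of_disjoint hdisj]
    by_cases hd : 0 < d
    · rw [Finset.filter_true_of_mem (fun _ _ => hd)]
      push_cast
      rw [Int.card_Icc, Int.toNat_of_nonneg (by omega)]
      simp [hd]
      ring
    · rw [Finset.filter_false_of_mem (fun _ _ => hd)]
      simp [hd]

theorem dsum_perm (E F : List (Int × Int)) (h : E.Perm F) (y : Int) : dsum E y = dsum F y :=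
  ((h.filter _).map Prod.snd).sum_eq

theorem dsum_flatMap (ivs : List (Int × Int)) (hv : ∀ p ∈ ivs, p.1 ≤ p.2) (y : Int) :
    dsum (ivs.flatMap (fun ab => [(ab.1, (1 : Int)), (ab.2 + 1, (-1 : Int))])) y
      = (ivs.countP (fun p => decide (p.1 ≤ y ∧ y ≤ p.2)) : Int) := by
  induction ivs with
  | nil => simp [dsum]
  | cons p rest ih =>
    have hp := hv p (by simp)
    have hrest := ih (fun q hq => hv q (by simp [hq]))
    rw [List.flatMap_cons, List.countP_cons]
    have : dsum (([(p.1, (1 : Int)), (p.2 + 1, (-1 : Int))] : List (Int × Int))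
        ++ rest.flatMap (fun ab => [(ab.1, (1 : Int)), (ab.2 + 1, (-1 : Int))])) y
        = (if p.1 ≤ y then 1 else 0) + ((if p.2 + 1 ≤ y then (-1 : Int) else 0)
            + dsum (rest.flatMap (fun ab => [(ab.1, (1 : Int)), (ab.2 + 1, (-1 : Int))])) y) := by
      rw [List.cons_append, List.cons_append, List.nil_append, dsum_cons, dsum_cons]
    rw [this, hrest]
    by_cases h1 : p.1 ≤ y <;> by_cases h2 : y ≤ p.2 <;>
      simp [h1, h2] <;> omega

theorem sum_snd_flatMap (ivs : List (Int × Int)) :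
    ((ivs.flatMap (fun ab => [(ab.1, (1 : Int)), (ab.2 + 1, (-1 : Int))])).map Prod.snd).sum
      = 0 := by
  induction ivs with
  | nil => simp
  | cons p rest ih => simp [List.flatMap_cons, ih]

theorem sweep_total (ivs : List (Int × Int)) (hv : ∀ p ∈ ivs, p.1 ≤ p.2) :
    ((PySem.List.sorted2 (ivs.flatMap (fun ab => [(ab.1, (1 : Int)), (ab.2 + 1, (-1 : Int))]))
        Prod.fst Prod.snd false).foldl
      (fun acc xd =>
        (if 0 < acc.2.1 then acc.1 + (xd.1 - acc.2.2) else acc.1, acc.2.1 + xd.2, xd.1))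
      ((0 : Int), (0 : Int), (0 : Int))).1 = ((ivS ivs).card : Int) := by
  set F := ivs.flatMap (fun ab => [(ab.1, (1 : Int)), (ab.2 + 1, (-1 : Int))]) with hF
  set Ev := PySem.List.sorted2 F Prod.fst Prod.snd false with hEv
  have hperm : Ev.Perm F := PySem.List.sorted2_perm F Prod.fst Prod.snd false
  have hpair : Ev.Pairwise (fun p q => p.1 ≤ q.1) := pairwise_fst_sorted2 F
  have hsum0 : (Ev.map Prod.snd).sum = 0 := by
    rw [(hperm.map Prod.snd).sum_eq, sum_snd_flatMap]
  have hdsum : ∀ y, dsum Ev y = (ivs.countP (fun p => decide (p.1 ≤ y ∧ y ≤ p.2)) : Int) :=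
    fun y => (dsum_perm Ev F hperm y).trans (dsum_flatMap ivs hv y)
  cases hEvc : Ev with
  | nil =>
    have hFnil : F = [] := (hEvc ▸ hperm).nil_eq.symm
    have hivs : ivs = [] := by
      cases ivs with
      | nil => rfl
      | cons p r => simp [hF, List.flatMap_cons] at hFnil
    simp [hivs, ivS]
  | cons e E' =>
    rw [hEvc] at hpair hsum0 hperm hdsum
    rw [List.pairwise_cons] at hpair
    set M0 := E'.foldl (fun m f => max m f.1) e.1 with hM0
    have hM := PySem.List.le_foldl_max_int E' Prod.fst e.1
    have hlo : ∀ f ∈ e :: E', e.1 ≤ f.1 := by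
      intro f hf
      rcases List.mem_cons.mp hf with rfl | hf'
      · exact le_refl _
      · exact hpair.1 f hf'
    have hhi : ∀ f ∈ e :: E', f.1 ≤ M0 := by
      intro f hf
      rcases List.mem_cons.mp hf with rfl | hf'
      · exact hM.1
      · exact hM.2 f hf'
    have hstep : (List.foldl (fun acc xd =>
          (if 0 < acc.2.1 then acc.1 + (xd.1 - acc.2.2) else acc.1, acc.2.1 + xd.2, xd.1))
          ((0 : Int), (0 : Int), (0 : Int)) (e :: E'))
        = (List.foldl (fun acc xd =>
          (if 0 < acc.2.1 then acc.1 + (xd.1 - acc.2.2) else acc.1, acc.2.1 + xd.2, xd.1))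
          ((0 : Int), e.2, e.1) E') := by
      simp
    rw [hstep, sweep_eq E' 0 e.2 e.1 M0 hpair.2 hpair.1
      (fun f hf => hhi f (by simp [hf]))
      (by simp at hsum0 ⊢; omega)]
    have hcov : covSet E' e.2 e.1 M0 = ivS ivs := by
      ext y
      simp only [covSet, Finset.mem_filter, Finset.mem_Icc, mem_ivS]
      constructor
      · rintro ⟨⟨h1, h2⟩, h3⟩
        have hEvy : 0 < dsum (e :: E') y := by
          rw [dsum_cons]
          simp [h1]
          omega
        rw [hdsum y] at hEvy
        have : 0 < ivs.countP (fun p => decide (p.1 ≤ y ∧ y ≤ p.2)) := by exact_mod_cast hEvy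
        rcases List.countP_pos_iff.mp this with ⟨p, hp, hpy⟩
        exact ⟨p, hp, by simpa using hpy⟩
      · rintro ⟨p, hp, h1, h2⟩
        have hmem1 : (p.1, (1 : Int)) ∈ e :: E' := by
          rw [hperm.mem_iff]
          exact List.mem_flatMap.mpr ⟨p, hp, by simp⟩
        have hmem2 : (p.2 + 1, (-1 : Int)) ∈ e :: E' := by
          rw [hperm.mem_iff]
          exact List.mem_flatMap.mpr ⟨p, hp, by simp⟩
        have hy1 : e.1 ≤ y := le_trans (hlo _ hmem1) h1
        have hy2 : y ≤ M0 - 1 := by have := hhi _ hmem2; omega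
        refine ⟨⟨hy1, hy2⟩, ?_⟩
        have hEvy : 0 < dsum (e :: E') y := by
          rw [hdsum y]
          have : 0 < ivs.countP (fun p => decide (p.1 ≤ y ∧ y ≤ p.2)) :=
            List.countP_pos_iff.mpr ⟨p, hp, by simp [h1, h2]⟩
          exact_mod_cast this
        rw [dsum_cons] at hEvy
        simp [hy1] at hEvy
        omega
    rw [hcov]
    ring


theorem mem_fold_set (P : (Int × Int) × (Int × Int) → Prop) [DecidablePred P]
    (I : (Int × Int) × (Int × Int) → Int × Int) (data : List ((Int × Int) × (Int × Int)))
    (y : Int × Int) :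
    y ∈ data.foldl (fun s sb => if P sb then PySem.Set.add s (I sb) else s) PySem.Set.empty
      ↔ ∃ sb ∈ data, P sb ∧ y = I sb := by
  rw [PySem.List.foldl_ite_eq_foldl_filter P (fun s sb => PySem.Set.add s (I sb))]
  rw [PySem.Set.mem_foldl_add]
  simp only [List.mem_filter, decide_eq_true_eq, PySem.Set.empty, List.not_mem_nil, false_or]
  constructor
  · rintro ⟨b, ⟨hb, hP⟩, hy⟩; exact ⟨b, hb, hP, hy⟩
  · rintro ⟨b, hb, hP, hy⟩; exact ⟨b, ⟨hb, hP⟩, hy⟩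

theorem mem_fold_append (P : (Int × Int) × (Int × Int) → Prop) [DecidablePred P]
    (I : (Int × Int) × (Int × Int) → Int × Int) (data : List ((Int × Int) × (Int × Int)))
    (y : Int × Int) :
    y ∈ data.foldl (fun s sb => if P sb then s ++ [I sb] else s) []
      ↔ ∃ sb ∈ data, P sb ∧ y = I sb := by
  rw [PySem.List.foldl_append_ite P I data []]
  simp only [List.nil_append, List.mem_map, List.mem_filter, decide_eq_true_eq]
  constructor
  · rintro ⟨b, ⟨hb, hP⟩, hy⟩; exact ⟨b, hb, hP, hy.symm⟩
  · rintro ⟨b, hb, hP, hy⟩; exact ⟨b, ⟨hb, hP⟩, hy.symm⟩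

-- ===== VERDICT (by name: the statement is the Claim_ definition above) =====
theorem part_1_spec : Claim_equal_part_1 := by
  intro data _
  unfold Spec_part_1
  simp only [part_1, part_1_alt, manhatten_distance]
  rw [PySem.List.foldl_prod_mk
    (f := fun (s : PySem.Set (Int × Int)) (sb : (Int × Int) × (Int × Int)) => PySem.Set.add s sb.2)
    (g := fun (s : PySem.Set (Int × Int)) (sb : (Int × Int) × (Int × Int)) =>
      if |(2000000 : Int) - sb.1.2| ≤ |sb.1.1 - sb.2.1| + |sb.1.2 - sb.2.2| then
        PySem.Set.add s
          (sb.1.1 - (|sb.1.1 - sb.2.1| + |sb.1.2 - sb.2.2| - |(2000000 : Int) - sb.1.2|),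
           sb.1.1 + (|sb.1.1 - sb.2.1| + |sb.1.2 - sb.2.2| - |(2000000 : Int) - sb.1.2|))
      else s)]
  rw [PySem.List.foldl_prod_mk
    (f := fun (s : PySem.Set (Int × Int)) (sb : (Int × Int) × (Int × Int)) => PySem.Set.add s sb.2)
    (g := fun (s : List (Int × Int)) (sb : (Int × Int) × (Int × Int)) =>
      if |(2000000 : Int) - sb.1.2| ≤ |sb.1.1 - sb.2.1| + |sb.1.2 - sb.2.2| then
        s ++ [(sb.1.1 - (|sb.1.1 - sb.2.1| + |sb.1.2 - sb.2.2| - |(2000000 : Int) - sb.1.2|),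
               sb.1.1 + (|sb.1.1 - sb.2.1| + |sb.1.2 - sb.2.2| - |(2000000 : Int) - sb.1.2|))]
      else s)]
  dsimp only
  congr 1
  set EA := data.foldl
      (fun (s : PySem.Set (Int × Int)) sb =>
        if |(2000000 : Int) - sb.1.2| ≤ |sb.1.1 - sb.2.1| + |sb.1.2 - sb.2.2| then
          PySem.Set.add s
            (sb.1.1 - (|sb.1.1 - sb.2.1| + |sb.1.2 - sb.2.2| - |(2000000 : Int) - sb.1.2|),
             sb.1.1 + (|sb.1.1 - sb.2.1| + |sb.1.2 - sb.2.2| - |(2000000 : Int) - sb.1.2|))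
        else s)
      PySem.Set.empty with hEA
  set LB := data.foldl
      (fun (s : List (Int × Int)) sb =>
        if |(2000000 : Int) - sb.1.2| ≤ |sb.1.1 - sb.2.1| + |sb.1.2 - sb.2.2| then
          s ++ [(sb.1.1 - (|sb.1.1 - sb.2.1| + |sb.1.2 - sb.2.2| - |(2000000 : Int) - sb.1.2|),
                 sb.1.1 + (|sb.1.1 - sb.2.1| + |sb.1.2 - sb.2.2| - |(2000000 : Int) - sb.1.2|))]
        else s)
      ([] : List (Int × Int)) with hLB
  set LA := PySem.List.sorted2 EA Prod.fst Prod.snd false with hLA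
  have hmemA : ∀ p, p ∈ LA ↔ ∃ sb ∈ data,
      (|(2000000 : Int) - sb.1.2| ≤ |sb.1.1 - sb.2.1| + |sb.1.2 - sb.2.2|) ∧
        p = (sb.1.1 - (|sb.1.1 - sb.2.1| + |sb.1.2 - sb.2.2| - |(2000000 : Int) - sb.1.2|),
             sb.1.1 + (|sb.1.1 - sb.2.1| + |sb.1.2 - sb.2.2| - |(2000000 : Int) - sb.1.2|)) := by
    intro p
    exact ((PySem.List.sorted2_perm EA Prod.fst Prod.snd false).mem_iff).trans
      (mem_fold_set _ _ data p)
  have hmemB : ∀ p, p ∈ LB ↔ ∃ sb ∈ data,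
      (|(2000000 : Int) - sb.1.2| ≤ |sb.1.1 - sb.2.1| + |sb.1.2 - sb.2.2|) ∧
        p = (sb.1.1 - (|sb.1.1 - sb.2.1| + |sb.1.2 - sb.2.2| - |(2000000 : Int) - sb.1.2|),
             sb.1.1 + (|sb.1.1 - sb.2.1| + |sb.1.2 - sb.2.2| - |(2000000 : Int) - sb.1.2|)) := by
    intro p
    exact mem_fold_append _ _ data p
  have hvA : ∀ p ∈ LA, p.1 ≤ p.2 := by
    intro p hp
    rcases (hmemA p).mp hp with ⟨sb, _, hc, rfl⟩
    simp only
    linarith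
  have hvB : ∀ p ∈ LB, p.1 ≤ p.2 := by
    intro p hp
    rcases (hmemB p).mp hp with ⟨sb, _, hc, rfl⟩
    simp only
    linarith
  have hA : finalizeM (mergeGo LA none 0) = ((ivS LA).card : Int) :=
    merge_total LA hvA (pairwise_fst_sorted2 EA)
  have hAB : ivS LA = ivS LB :=
    ivS_congr _ _ (fun p => (hmemA p).trans (hmemB p).symm)
  rw [sweep_total LB hvB, ← hAB, ← hA]
  cases hmg : mergeGo LA none 0 with
  | mk t0 ob => cases ob <;> simp [finalizeM]
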